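-- pv_equiv track=rewrite | github.com/AhmadTariqAlflahat/AutoComplete-Search-Engine-Based-Text-File | search_engine/search/stem.py | cvc
-- ===== SOURCE A (Python) =====
-- vowel_set = ('A', 'I', 'U', 'O', 'E')
--
-- def cvc(token):
--     prv, cur = None, None
--     for t in token:
--         if prv not in vowel_set and cur in vowel_set and t not in vowel_set:
--             if t not in ['W', 'X', 'Y']:
--                 return True
--         prv = cur
--         cur = t
--     return False
-- ===== SOURCE B (Python) =====
-- def cvc(token):
--     # Stage 1: map each character to its class: 'v' vowel, 'w' W/X/Y, 'c' other.
--     shape = ''.join('v' if c in 'AIUOE' else 'w' if c in 'WXY' else 'c' for c in token)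
--     # Stage 2: the pattern holds iff the shape string starts with "vc"
--     # (start of string counts as a consonant) or contains "cvc" or "wvc".
--     return shape.startswith('vc') or 'cvc' in shape or 'wvc' in shape
-- ===== Notes on version B (the rewrite author's own statement) =====
-- stated objective: alternative
-- what changed: Replaced the stateful prv/cur scan with two stages: map every character to a class letter ('v' vowel, 'w' W/X/Y, 'c' other consonant) building a shape string, then decide by substring tests: shape.startswith('vc') or 'cvc' in shape or 'wvc' in shape.
import Mathlib
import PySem

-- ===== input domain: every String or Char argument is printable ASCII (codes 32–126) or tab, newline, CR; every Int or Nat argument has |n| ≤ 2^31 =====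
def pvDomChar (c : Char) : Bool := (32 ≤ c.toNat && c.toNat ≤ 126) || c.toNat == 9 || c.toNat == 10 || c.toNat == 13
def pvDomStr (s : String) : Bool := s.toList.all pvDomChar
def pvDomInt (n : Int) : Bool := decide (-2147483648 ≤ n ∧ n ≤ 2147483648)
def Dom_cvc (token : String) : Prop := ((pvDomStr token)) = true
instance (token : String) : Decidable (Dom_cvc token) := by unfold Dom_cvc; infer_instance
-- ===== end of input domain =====

-- B replaces A's stateful prv/cur scan with two stages: classify each character into a
-- shape string over {v,w,c}, then test startswith "vc" / substring "cvc" / "wvc" (objective: alternative).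

-- ===== PORT A =====
def pvVowel (c : Char) : Bool := c == 'A' || c == 'I' || c == 'U' || c == 'O' || c == 'E'

def pvVowelO : Option Char → Bool
  | none => false
  | some c => pvVowel c

def cvcLoop (prv cur : Option Char) : List Char → Bool
  | [] => false
  | t :: rest =>
    if !pvVowelO prv && pvVowelO cur && !pvVowel t && !(t == 'W' || t == 'X' || t == 'Y') then
      true
    else cvcLoop cur (some t) rest

def cvc (token : String) : Bool := cvcLoop none none token.toList

-- ===== PORT B =====
-- Source B's classifier: 'v' for a vowel, 'w' for W/X/Y, 'c' otherwise
def pvClassify (c : Char) : Char :=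
  if pvVowel c then 'v' else if c == 'W' || c == 'X' || c == 'Y' then 'w' else 'c'

-- Python's substring test `p in s` on these ASCII strings is "p is a prefix of some suffix";
-- ported by hand (exact): scan the suffixes, testing a prefix match at each.
def pvIsInfixOf (p : List Char) : List Char → Bool
  | [] => p.isEmpty
  | a :: as => p.isPrefixOf (a :: as) || pvIsInfixOf p as

-- `s.startswith(p)` is List.isPrefixOf on the character lists (exact on ASCII).
def cvc_alt (token : String) : Bool :=
  let shape := token.toList.map pvClassify
  ['v', 'c'].isPrefixOf shape ||
    pvIsInfixOf ['c', 'v', 'c'] shape || pvIsInfixOf ['w', 'v', 'c'] shape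

-- ===== PRECONDITION & SPEC =====
def Spec_cvc (token : String) (out : Bool) : Prop := out = cvc_alt token
instance (token : String) (out : Bool) : Decidable (Spec_cvc token out) := by unfold Spec_cvc; infer_instance

-- ===== CLAIM (what is proved, stated in full; the proofs are below) =====
def Claim_equal_cvc : Prop := ∀ (token : String), Dom_cvc token → Spec_cvc token (cvc token)

-- ===== LEMMAS AND PROOFS =====

-- sliding-window reading of the shape (with the two-'c' left padding folded in)
def pvQ : List Char → Bool
  | [] => false
  | [_] => false
  | [_, _] => false
  | x :: y :: z :: r => ((x != 'v') && (y == 'v') && (z == 'c')) || pvQ (y :: z :: r)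

def pvClO : Option Char → Char
  | none => 'c'
  | some c => pvClassify c

theorem pvVowelO_eq_cl (o : Option Char) : pvVowelO o = (pvClO o == 'v') := by
  cases o with
  | none => rfl
  | some c =>
    simp only [pvVowelO, pvClO, pvClassify]
    split_ifs <;> simp_all

theorem pvCons_eq_cl (t : Char) :
    (!pvVowel t && !(t == 'W' || t == 'X' || t == 'Y')) = (pvClassify t == 'c') := by
  simp only [pvClassify]
  split_ifs <;> (simp_all; try tauto)

theorem cvcLoop_eq_pvQ (l : List Char) : ∀ (p c : Option Char),
    cvcLoop p c l = pvQ (pvClO p :: pvClO c :: l.map pvClassify) := by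
  induction l with
  | nil => intro p c; simp [cvcLoop, pvQ]
  | cons t ts ih =>
    intro p c
    rw [cvcLoop]
    have hif : ∀ (C X : Bool), (if C = true then true else X) = (C || X) := by
      intro C X; cases C <;> simp
    rw [hif, ih]
    show _ = pvQ (pvClO p :: pvClO c :: pvClassify t :: ts.map pvClassify)
    rw [pvQ]
    congr 1
    have hct := pvCons_eq_cl t
    rw [pvVowelO_eq_cl p, pvVowelO_eq_cl c]
    cases hp : (pvClO p == 'v') <;> cases hc : (pvClO c == 'v') <;>
      cases hv : pvVowel t <;> cases hw : (t == 'W' || t == 'X' || t == 'Y') <;>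
        simp_all [bne]

theorem pvBeqComm (a b : Char) : (a == b) = (b == a) := by
  by_cases h : a = b
  · subst h; rfl
  · simp [h, Ne.symm h]

theorem pvClassify_cases (c : Char) :
    pvClassify c = 'c' ∨ pvClassify c = 'v' ∨ pvClassify c = 'w' := by
  simp only [pvClassify]
  split_ifs <;> simp

theorem pvQ_eq_infix : ∀ (sh : List Char),
    (∀ x ∈ sh, x = 'c' ∨ x = 'v' ∨ x = 'w') →
    pvQ sh = (pvIsInfixOf ['c', 'v', 'c'] sh || pvIsInfixOf ['w', 'v', 'c'] sh) := by
  intro sh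
  induction sh using pvQ.induct with
  | case1 => intro _; simp [pvQ, pvIsInfixOf]
  | case2 a => intro _; simp [pvQ, pvIsInfixOf, List.isPrefixOf]
  | case3 a b => intro _; simp [pvQ, pvIsInfixOf, List.isPrefixOf]
  | case4 x y z r ih =>
    intro h
    have hx := h x (by simp)
    rw [pvQ, ih (fun a ha => h a (by simp [ha]; try tauto))]
    show _ = ((List.isPrefixOf _ _ || pvIsInfixOf _ (y :: z :: r)) ||
      (List.isPrefixOf _ _ || pvIsInfixOf _ (y :: z :: r)))
    simp only [List.isPrefixOf, pvBeqComm 'v' y, pvBeqComm 'c' z]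
    rcases hx with hx | hx | hx <;> subst hx <;>
      cases hy : (y == 'v') <;> cases hz : (z == 'c') <;>
        cases i1 : pvIsInfixOf ['c', 'v', 'c'] (y :: z :: r) <;>
          cases i2 : pvIsInfixOf ['w', 'v', 'c'] (y :: z :: r) <;>
            rfl

theorem cvc_eq_alt (token : String) : cvc token = cvc_alt token := by
  unfold cvc cvc_alt
  rw [cvcLoop_eq_pvQ]
  have hmem : ∀ x ∈ token.toList.map pvClassify, x = 'c' ∨ x = 'v' ∨ x = 'w' := by
    intro x hx
    rcases List.mem_map.mp hx with ⟨c, _, rfl⟩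
    exact pvClassify_cases c
  cases hsh : token.toList.map pvClassify with
  | nil => simp [pvQ, pvIsInfixOf, List.isPrefixOf]
  | cons s0 r =>
    cases r with
    | nil => simp [pvQ, pvIsInfixOf, List.isPrefixOf]
    | cons s1 r2 =>
      show pvQ ('c' :: 'c' :: s0 :: s1 :: r2) = _
      rw [pvQ, pvQ]
      have hm : ∀ x ∈ s0 :: s1 :: r2, x = 'c' ∨ x = 'v' ∨ x = 'w' := by
        rw [← hsh]; exact hmem
      rw [pvQ_eq_infix _ hm]
      simp only [List.isPrefixOf, pvBeqComm 'v' s0, pvBeqComm 'c' s1]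
      cases h0 : (s0 == 'v') <;> cases h1 : (s1 == 'c') <;>
        cases i1 : pvIsInfixOf ['c', 'v', 'c'] (s0 :: s1 :: r2) <;>
          cases i2 : pvIsInfixOf ['w', 'v', 'c'] (s0 :: s1 :: r2) <;>
            rfl

-- ===== VERDICT (by name: the statement is the Claim_ definition above) =====
theorem cvc_spec : Claim_equal_cvc := by
  intro token _
  unfold Spec_cvc
  exact cvc_eq_alt token
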